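-- pv_equiv track=rewrite | github.com/abdelrahman-m123/Sorting_Algorithms_Analyzer | Sorting_Algorithm_Analyzer.py | heap_sort_steps
-- ===== SOURCE A (Python) =====
-- class StepCounter:
--     comparisons = 0
--     swaps = 0
--     def _init_(self):
--         self.comparisons = 0
--         self.swaps = 0
--
--     def add_comparison(self):
--         self.comparisons += 1
--
--     def add_swap(self):
--         self.swaps += 1
--
--     def total_steps(self):
--         return self.comparisons + self.swaps
--
-- def heap_sort_steps(arr):
--     counter = StepCounter()
--
--     def max_heapify(arr, n, i):
--         largest = i
--         left = 2 * i + 1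
--         right = 2 * i + 2
--
--         if left < n and arr[left] > arr[largest]:
--             largest = left
--             counter.add_comparison()
--         else:
--             largest = i
--
--         if right < n and arr[right] > arr[largest] :
--                 largest = right
--                 counter.add_comparison()
--
--         if largest != i:
--             counter.add_swap()
--             arr[i], arr[largest] = arr[largest], arr[i]
--             max_heapify(arr, n, largest)
--
--
--     def build_max_heap(arr):
--         n = len(arr)
--         for i in range(n //2 -1 , -1,-1 ):
--             max_heapify(arr,n,i)
--
--     n = len(arr)
--     build_max_heap(arr)
--
--
--     for i in range(n - 1, 0, -1):
--         counter.add_swap()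
--         arr[i], arr[0] = arr[0], arr[i]
--         max_heapify(arr, i, 0)
--
--     return counter.total_steps()
-- ===== SOURCE B (Python) =====
-- def heap_sort_steps(arr):
--     # Iterative sift-down with plain integer counters (vs A's recursive
--     # max_heapify and StepCounter class). Sorts arr in place like A.
--     comparisons = 0
--     swaps = 0
--
--     def sift_down(n, i):
--         nonlocal comparisons, swaps
--         while True:
--             largest = i
--             left = 2 * i + 1
--             right = 2 * i + 2
--             if left < n and arr[left] > arr[largest]:
--                 largest = left
--                 comparisons += 1
--             if right < n and arr[right] > arr[largest]:
--                 largest = right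
--                 comparisons += 1
--             if largest == i:
--                 break
--             swaps += 1
--             arr[i], arr[largest] = arr[largest], arr[i]
--             i = largest
--
--     n = len(arr)
--     for i in range(n // 2 - 1, -1, -1):
--         sift_down(n, i)
--     for end in range(n - 1, 0, -1):
--         swaps += 1
--         arr[end], arr[0] = arr[0], arr[end]
--         sift_down(end, 0)
--
--     return comparisons + swaps
-- ===== Notes on version B (the rewrite author's own statement) =====
-- stated objective: alternative
-- what changed: max_heapify's recursion (with its StepCounter object and per-step method calls) is replaced by an iterative while-loop sift-down with plain integer counters, and the outer loops are ported as countdown recursions; same step counts, same in-place sort.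
import Mathlib
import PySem

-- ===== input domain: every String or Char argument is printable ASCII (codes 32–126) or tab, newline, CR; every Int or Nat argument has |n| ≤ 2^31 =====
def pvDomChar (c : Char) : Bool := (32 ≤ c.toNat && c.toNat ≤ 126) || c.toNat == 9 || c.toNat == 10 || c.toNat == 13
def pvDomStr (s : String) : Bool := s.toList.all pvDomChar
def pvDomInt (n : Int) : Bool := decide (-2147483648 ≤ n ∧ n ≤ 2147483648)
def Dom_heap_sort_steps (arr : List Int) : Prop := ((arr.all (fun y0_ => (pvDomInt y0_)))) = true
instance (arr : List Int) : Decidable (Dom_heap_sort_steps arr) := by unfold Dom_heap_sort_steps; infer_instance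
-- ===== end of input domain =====

-- B replaces A's recursive max_heapify + StepCounter object by an iterative while-loop sift-down
-- with plain integer counters (same step counts); the equivalence proved is about the RETURN value
-- only — both Pythons sort arr in place the same way.

-- `arr[i], arr[j] = arr[j], arr[i]` (both programs use this exact form; indices in range when used)
def pvSwap (a : List Int) (i j : Nat) : List Int :=
  (a.set i (a.getD j 0)).set j (a.getD i 0)

-- ===== PORT A =====
-- recursive max_heapify, threading (comparisons, swaps); A's dead `else: largest = i` branch is
-- the else-branch `(i, c)` of p1
def heapifyA (a : List Int) (n i : Nat) (c s : Int) : List Int × Int × Int :=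
  let left := 2 * i + 1
  let right := 2 * i + 2
  let p1 : Nat × Int := if left < n ∧ a.getD left 0 > a.getD i 0 then (left, c + 1) else (i, c)
  let p2 : Nat × Int := if right < n ∧ a.getD right 0 > a.getD p1.1 0 then (right, p1.2 + 1) else p1
  if _h : p2.1 ≠ i then
    heapifyA (pvSwap a i p2.1) n p2.1 p2.2 (s + 1)
  else (a, p2.2, s)
termination_by n - i
decreasing_by
  simp only [p2, p1] at _h ⊢
  split_ifs at _h ⊢ <;> omega

def heap_sort_steps (arr : List Int) : Int :=
  let n := arr.length
  let st1 := (PySem.List.pyRange (((n / 2 : Nat) : Int) - 1) (-1) (-1)).foldl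
      (fun st i => heapifyA st.1 n i.toNat st.2.1 st.2.2) (arr, 0, 0)
  let st2 := (PySem.List.pyRange ((n : Int) - 1) 0 (-1)).foldl
      (fun st i => heapifyA (pvSwap st.1 i.toNat 0) i.toNat 0 st.2.1 (st.2.2 + 1)) st1
  st2.2.1 + st2.2.2

-- ===== PORT B =====
-- one pass of the while-loop body: pick the larger child, counting each successful comparison
def pickLargest (a : List Int) (n i : Nat) (c : Int) : Nat × Int :=
  let left := 2 * i + 1
  let right := 2 * i + 2
  let q : Nat × Int := if left < n ∧ a.getD left 0 > a.getD i 0 then (left, c + 1) else (i, c)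
  if right < n ∧ a.getD right 0 > a.getD q.1 0 then (right, q.2 + 1) else q

-- needed by siftB's termination proof (cited in decreasing_by)
theorem pickLargest_bounds (a : List Int) (n i : Nat) (c : Int)
    (h : (pickLargest a n i c).1 ≠ i) : i < (pickLargest a n i c).1 ∧ (pickLargest a n i c).1 < n := by
  simp only [pickLargest] at h ⊢
  split_ifs at h ⊢ <;> simp_all <;> omega

-- the `while True` loop of B's sift_down, state (arr, i, comparisons, swaps)
def siftB (a : List Int) (n i : Nat) (c s : Int) : List Int × Int × Int :=
  let q := pickLargest a n i c
  if h : q.1 = i then (a, q.2, s)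
  else siftB (pvSwap a i q.1) n q.1 q.2 (s + 1)
termination_by n - i
decreasing_by
  have := pickLargest_bounds a n i c h
  omega

-- `for i in range(n//2 - 1, -1, -1): sift_down(n, i)` as a countdown over the remaining indices
def buildB (n : Nat) : Nat → List Int × Int × Int → List Int × Int × Int
  | 0, st => st
  | k + 1, st => buildB n k (siftB st.1 n k st.2.1 st.2.2)

-- `for end in range(n - 1, 0, -1)` as a countdown; end = k + 1 at each step
def extractB : Nat → List Int × Int × Int → List Int × Int × Int
  | 0, st => st
  | k + 1, st => extractB k (siftB (pvSwap st.1 (k + 1) 0) (k + 1) 0 st.2.1 (st.2.2 + 1))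

def heap_sort_steps_alt (arr : List Int) : Int :=
  let n := arr.length
  let st := extractB (n - 1) (buildB n (n / 2) (arr, 0, 0))
  st.2.1 + st.2.2

-- ===== PRECONDITION & SPEC =====
def Spec_heap_sort_steps (arr : List Int) (out : Int) : Prop := out = heap_sort_steps_alt arr
instance (arr : List Int) (out : Int) : Decidable (Spec_heap_sort_steps arr out) := by unfold Spec_heap_sort_steps; infer_instance

-- ===== CLAIM (what is proved, stated in full; the proofs are below) =====
def Claim_equal_heap_sort_steps : Prop := ∀ (arr : List Int), Dom_heap_sort_steps arr → Spec_heap_sort_steps arr (heap_sort_steps arr)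

-- ===== LEMMAS AND PROOFS =====

-- A's recursive max_heapify and B's iterative sift-down compute the same state
theorem heapifyA_eq_siftB (n : Nat) (a : List Int) (i : Nat) (c s : Int) :
    heapifyA a n i c s = siftB a n i c s := by
  induction a, i, c, s using heapifyA.induct (n := n) with
  | case1 a i c s left right p1 p2 hne ih =>
    rw [heapifyA, siftB]
    simp only [pickLargest]
    simp only [p2, p1, left, right] at hne ih
    split_ifs at hne ih ⊢ <;> first | rfl | exact ih
  | case2 a i c s left right p1 p2 hne =>
    rw [heapifyA, siftB]
    simp only [pickLargest]
    simp only [p2, p1, left, right] at hne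
    split_ifs at hne ⊢ <;> first | rfl | omega

-- A's build_max_heap loop over range(k-1, -1, -1) equals B's countdown buildB
theorem build_eq (n : Nat) : ∀ (k : Nat) (st : List Int × Int × Int),
    (PySem.List.pyRange ((k : Int) - 1) (-1) (-1)).foldl
      (fun st i => heapifyA st.1 n i.toNat st.2.1 st.2.2) st = buildB n k st := by
  intro k
  induction k with
  | zero => intro st; rw [PySem.List.pyRange_neg_one_eq_nil (by omega)]; rfl
  | succ k ih =>
    intro st
    have h1 : ((k + 1 : Nat) : Int) - 1 = (k : Int) := by push_cast; ring
    rw [h1, PySem.List.pyRange_neg_one_cons (by omega)]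
    simp only [List.foldl_cons, Int.toNat_natCast]
    rw [ih, buildB, heapifyA_eq_siftB]

-- A's extraction loop over range(k, 0, -1) equals B's countdown extractB
theorem extract_eq : ∀ (k : Nat) (st : List Int × Int × Int),
    (PySem.List.pyRange (k : Int) 0 (-1)).foldl
      (fun st i => heapifyA (pvSwap st.1 i.toNat 0) i.toNat 0 st.2.1 (st.2.2 + 1)) st = extractB k st := by
  intro k
  induction k with
  | zero => intro st; rw [PySem.List.pyRange_neg_one_eq_nil (by omega)]; rfl
  | succ k ih =>
    intro st
    rw [PySem.List.pyRange_neg_one_cons (by omega)]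
    simp only [List.foldl_cons, Int.toNat_natCast]
    rw [show ((k + 1 : Nat) : Int) - 1 = (k : Int) by push_cast; ring, ih, extractB, heapifyA_eq_siftB]

-- ===== VERDICT (by name: the statement is the Claim_ definition above) =====
theorem heap_sort_steps_spec : Claim_equal_heap_sort_steps := by
  intro arr _
  unfold Spec_heap_sort_steps
  simp only [heap_sort_steps, heap_sort_steps_alt]
  rw [build_eq]
  cases h : arr.length with
  | zero =>
    rw [show ((0 : Nat) : Int) - 1 = -1 by ring, PySem.List.pyRange_neg_one_eq_nil (by omega)]
    rfl
  | succ m =>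
    rw [show ((m + 1 : Nat) : Int) - 1 = ((m : Nat) : Int) by push_cast; ring, extract_eq]
    rfl
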